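-- pv_equiv track=rewrite | github.com/PurpleKaz81/cgpt | cgpt/domain/dossier_cleaning_cleanup.py | _extract_deliverables
-- ===== SOURCE A (Python) =====
-- from typing import Dict, List, Optional, Tuple
--
-- def _extract_deliverables(text: str, patterns: Optional[List[str]] = None) -> str:
--     """Extract deliverables only (headings, constraints, drafts).
--
--     If patterns provided, match against section headers.
--     Default patterns: "##", "Constraint", "Draft", "Decision", "Output", "Result"
--     """
--     if patterns is None:
--         patterns = [
--             "##",
--             "constraint",
--             "draft",
--             "decision",
--             "output",
--             "result",
--             "deliverable",
--         ]
--
--     lines = text.split("\n")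
--     deliverables = []
--     in_section = False
--     current_section = []
--
--     for line in lines:
--         line_lower = line.lower()
--
--         # Check if line matches any pattern (start of a deliverable)
--         matches_pattern = any(p.lower() in line_lower for p in patterns)
--
--         if matches_pattern:
--             # Save previous section if any
--             if current_section:
--                 deliverables.extend(current_section)
--             # Start new section
--             in_section = True
--             current_section = [line]
--         elif in_section:
--             # Continue collecting section content
--             if line.strip():  # Include non-empty lines
--                 current_section.append(line)
--             elif current_section and len(current_section) > 1:
--                 # Stop section on blank line (after content)
--                 deliverables.extend(current_section)
--                 current_section = []
--                 in_section = False
--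
--     # Include final section
--     if current_section:
--         deliverables.extend(current_section)
--
--     return "\n".join(deliverables)
-- ===== SOURCE B (Python) =====
-- from typing import List, Optional
--
-- _DEFAULT_PATTERNS = [
--     "##",
--     "constraint",
--     "draft",
--     "decision",
--     "output",
--     "result",
--     "deliverable",
-- ]
--
--
-- def _split_segments(lines, is_hdr):
--     """Segment lines into (header, following-lines) chunks; the preamble
--     before the first header is discarded."""
--     segs = []
--     rest = lines
--     while rest:
--         if not is_hdr(rest[0]):
--             rest = rest[1:]
--             continue
--         hdr, rest = rest[0], rest[1:]
--         seg = []
--         while rest and not is_hdr(rest[0]):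
--             seg.append(rest[0])
--             rest = rest[1:]
--         segs.append((hdr, seg))
--     return segs
--
--
-- def _render(hdr, seg):
--     """Header, then the first run of non-blank lines (leading blanks are
--     skipped, everything after the first blank-after-content is dropped)."""
--     body = seg
--     while body and not body[0].strip():
--         body = body[1:]
--     kept = [hdr]
--     while body and body[0].strip():
--         kept.append(body[0])
--         body = body[1:]
--     return kept
--
--
-- def _extract_deliverables(text: str, patterns: Optional[List[str]] = None) -> str:
--     if patterns is None:
--         patterns = _DEFAULT_PATTERNS
--     pats = [p.lower() for p in patterns]
--     lines = text.split("\n")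
--     is_hdr = lambda line: any(p in line.lower() for p in pats)
--     out = []
--     for hdr, seg in _split_segments(lines, is_hdr):
--         out.extend(_render(hdr, seg))
--     return "\n".join(out)
-- ===== Notes on version B (the rewrite author's own statement) =====
-- stated objective: alternative
-- what changed: Replaces A's single stateful loop (in_section flag + current_section buffer with flush-on-header/blank) by a two-phase decomposition: first segment the lines into (header, following-lines) chunks, then render each chunk independently as header plus dropWhile-blanks/takeWhile-nonblank of its body.
import Mathlib
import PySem

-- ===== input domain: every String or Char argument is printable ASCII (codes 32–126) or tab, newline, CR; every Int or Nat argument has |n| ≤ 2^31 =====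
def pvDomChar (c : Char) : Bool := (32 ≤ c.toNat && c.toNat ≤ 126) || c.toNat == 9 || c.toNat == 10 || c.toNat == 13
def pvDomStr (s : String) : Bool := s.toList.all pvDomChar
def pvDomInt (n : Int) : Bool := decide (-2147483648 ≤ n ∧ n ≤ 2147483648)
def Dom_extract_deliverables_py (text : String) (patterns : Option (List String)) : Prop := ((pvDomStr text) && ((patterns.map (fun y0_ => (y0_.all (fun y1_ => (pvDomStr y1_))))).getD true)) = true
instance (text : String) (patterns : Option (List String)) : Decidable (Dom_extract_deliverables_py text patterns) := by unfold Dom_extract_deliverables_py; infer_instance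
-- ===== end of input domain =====

-- B is a different decomposition: segment the lines by header indices first, then render each
-- segment with a dropWhile/takeWhile closed form, instead of A's single stateful flag loop.

def pvDefaultPatterns : List String :=
  ["##", "constraint", "draft", "decision", "output", "result", "deliverable"]

-- ===== PORT A =====
-- literal transliteration of A's for-loop with state (deliverables, in_section, current_section)
def pvALoop (patterns : List String) : List String → List String → Bool → List String → List String
  | [], deliverables, _, current_section =>
    -- "if current_section: deliverables.extend(current_section)" then join
    if current_section ≠ [] then deliverables ++ current_section else deliverables
  | line :: lines, deliverables, in_section, current_section =>
    let line_lower := PySem.Str.lower line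
    let matches_pattern := patterns.any (fun p => PySem.Str.isIn (PySem.Str.lower p) line_lower)
    if matches_pattern then
      pvALoop patterns lines
        (if current_section ≠ [] then deliverables ++ current_section else deliverables)
        true [line]
    else if in_section then
      if PySem.Str.strip line ≠ "" then
        pvALoop patterns lines deliverables in_section (current_section ++ [line])
      else if current_section ≠ [] ∧ current_section.length > 1 then
        pvALoop patterns lines (deliverables ++ current_section) false []
      else
        pvALoop patterns lines deliverables in_section current_section
    else
      pvALoop patterns lines deliverables in_section current_section

def extract_deliverables_py (text : String) (patterns : Option (List String)) : String :=
  let patterns := patterns.getD pvDefaultPatterns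
  let lines := (PySem.Str.split? text "\n").getD []   -- sep "\n" ≠ "": always `some`
  PySem.Str.join "\n" (pvALoop patterns lines [] false [])

-- ===== PORT B =====
def pvIsHdr (pats : List String) (line : String) : Bool :=
  pats.any (fun p => PySem.Str.isIn p (PySem.Str.lower line))

-- inner while of _split_segments: collect the segment until the next header, return the rest
def pvSegCollect (pats : List String) : List String → List String × List String
  | [] => ([], [])
  | l :: ls =>
    if pvIsHdr pats l then ([], l :: ls)
    else
      let p := pvSegCollect pats ls
      (l :: p.1, p.2)

theorem pvSegCollect_rest_le (pats : List String) (ls : List String) :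
    (pvSegCollect pats ls).2.length ≤ ls.length := by
  induction ls with
  | nil => simp [pvSegCollect]
  | cons l ls ih =>
    simp only [pvSegCollect]
    split
    · simp
    · simpa using Nat.le_succ_of_le ih

-- outer while of _split_segments
def pvSegments (pats : List String) : List String → List (String × List String)
  | [] => []
  | l :: ls =>
    if pvIsHdr pats l then
      let p := pvSegCollect pats ls
      (l, p.1) :: pvSegments pats p.2
    else
      pvSegments pats ls
termination_by ls => ls.length
decreasing_by
  · have := pvSegCollect_rest_le pats ls; simpa using Nat.lt_succ_of_le this
  · simp

-- _render: drop leading blanks, keep the first run of non-blank lines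
def pvRender (hdr : String) (seg : List String) : List String :=
  let body := seg.dropWhile (fun l => PySem.Str.strip l == "")
  hdr :: body.takeWhile (fun l => PySem.Str.strip l != "")

def extract_deliverables_py_alt (text : String) (patterns : Option (List String)) : String :=
  let patterns := patterns.getD pvDefaultPatterns
  let pats := patterns.map PySem.Str.lower
  let lines := (PySem.Str.split? text "\n").getD []   -- sep "\n" ≠ "": always `some`
  PySem.Str.join "\n" ((pvSegments pats lines).flatMap (fun s => pvRender s.1 s.2))

-- ===== PRECONDITION & SPEC =====
def Spec_extract_deliverables_py (text : String) (patterns : Option (List String)) (out : String) : Prop := out = extract_deliverables_py_alt text patterns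
instance (text : String) (patterns : Option (List String)) (out : String) : Decidable (Spec_extract_deliverables_py text patterns out) := by unfold Spec_extract_deliverables_py; infer_instance

-- ===== CLAIM (what is proved, stated in full; the proofs are below) =====
def Claim_equal_extract_deliverables_py : Prop := ∀ (text : String) (patterns : Option (List String)), Dom_extract_deliverables_py text patterns → Spec_extract_deliverables_py text patterns (extract_deliverables_py text patterns)

-- ===== LEMMAS AND PROOFS =====

-- B's deliverables list for a given line list
def pvOutB (pats : List String) (ls : List String) : List String :=
  (pvSegments pats ls).flatMap (fun s => pvRender s.1 s.2)

theorem pvSegCollect_eq (pats : List String) (ls : List String) :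
    pvSegCollect pats ls =
      (ls.takeWhile (fun l => !pvIsHdr pats l), ls.dropWhile (fun l => !pvIsHdr pats l)) := by
  induction ls with
  | nil => simp [pvSegCollect]
  | cons l ls ih =>
    simp only [pvSegCollect, List.takeWhile_cons, List.dropWhile_cons]
    by_cases h : pvIsHdr pats l <;> simp [h, ih]

theorem pvOutB_nil (pats : List String) : pvOutB pats [] = [] := by
  simp [pvOutB, pvSegments]

theorem pvOutB_cons_not (pats : List String) (l : String) (ls : List String)
    (h : pvIsHdr pats l = false) : pvOutB pats (l :: ls) = pvOutB pats ls := by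
  simp [pvOutB, pvSegments, h]

theorem pvOutB_cons_hdr (pats : List String) (l : String) (ls : List String)
    (h : pvIsHdr pats l = true) :
    pvOutB pats (l :: ls) =
      pvRender l (ls.takeWhile (fun x => !pvIsHdr pats x)) ++
        pvOutB pats (ls.dropWhile (fun x => !pvIsHdr pats x)) := by
  simp [pvOutB, pvSegments, h, pvSegCollect_eq]

theorem pvOutB_dropWhile (pats : List String) (p : String → Bool)
    (hp : ∀ x, p x = true → pvIsHdr pats x = false) (ls : List String) :
    pvOutB pats (ls.dropWhile p) = pvOutB pats ls := by
  induction ls with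
  | nil => simp
  | cons l ls ih =>
    rw [List.dropWhile_cons]
    by_cases h : p l
    · rw [if_pos h, ih, pvOutB_cons_not pats l ls (hp l h)]
    · rw [if_neg h]

-- A's header test equals B's (B lowers the patterns once up front)
theorem pvMatches_eq (patterns : List String) (line : String) :
    patterns.any (fun p => PySem.Str.isIn (PySem.Str.lower p) (PySem.Str.lower line)) =
      pvIsHdr (patterns.map PySem.Str.lower) line := by
  simp [pvIsHdr, List.any_map, Function.comp_def]



theorem pvRender_cons_content (hdr l : String) (seg : List String)
    (hB : ¬ PySem.Str.strip l = "") :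
    pvRender hdr (l :: seg) =
      hdr :: l :: seg.takeWhile (fun x => PySem.Str.strip x != "") := by
  simp [pvRender, hB]

-- one unfolding step of A's loop, with the header test already rewritten to B's
theorem pvALoop_cons (patterns : List String) (l : String) (ls d : List String)
    (ins : Bool) (c : List String) :
    pvALoop patterns (l :: ls) d ins c =
      if pvIsHdr (patterns.map PySem.Str.lower) l then
        pvALoop patterns ls (if c ≠ [] then d ++ c else d) true [l]
      else if ins then
        if PySem.Str.strip l ≠ "" then pvALoop patterns ls d ins (c ++ [l])
        else if c ≠ [] ∧ c.length > 1 then pvALoop patterns ls (d ++ c) false []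
        else pvALoop patterns ls d ins c
      else pvALoop patterns ls d ins c := by
  simp only [pvALoop, pvMatches_eq]

-- the combined invariant: A's loop from each reachable state equals B's segment rendering
theorem pvMain (patterns : List String) :
    ∀ n (ls : List String), ls.length ≤ n →
      ((∀ d, pvALoop patterns ls d false [] = d ++ pvOutB (patterns.map PySem.Str.lower) ls) ∧
       (∀ d hdr, pvALoop patterns ls d true [hdr] =
          d ++ pvRender hdr (ls.takeWhile (fun x => !pvIsHdr (patterns.map PySem.Str.lower) x)) ++
            pvOutB (patterns.map PySem.Str.lower) ls) ∧
       (∀ d hdr k, k ≠ [] → pvALoop patterns ls d true (hdr :: k) =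
          d ++ hdr :: k ++
            ls.takeWhile (fun x => !pvIsHdr (patterns.map PySem.Str.lower) x &&
              !(PySem.Str.strip x == "")) ++
            pvOutB (patterns.map PySem.Str.lower) ls)) := by
  intro n
  induction n with
  | zero =>
    intro ls hls
    have : ls = [] := List.length_eq_zero_iff.mp (Nat.le_zero.mp hls)
    subst this
    refine ⟨?_, ?_, ?_⟩ <;> intros <;> simp [pvALoop, pvOutB_nil, pvRender]
  | succ n ih =>
    intro ls hls
    match ls with
    | [] =>
      refine ⟨?_, ?_, ?_⟩ <;> intros <;> simp [pvALoop, pvOutB_nil, pvRender]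
    | l :: ls =>
      have hlen : ls.length ≤ n := by simpa using Nat.lt_succ_iff.mp (Nat.lt_of_lt_of_le (by simp) hls)
      obtain ⟨ihOut, ihHdr, ihBody⟩ := ih ls hlen
      set pats := patterns.map PySem.Str.lower with hpats
      by_cases hH : pvIsHdr pats l
      · -- l is a header line
        refine ⟨?_, ?_, ?_⟩
        · intro d
          rw [pvALoop_cons]
          simp only [← hpats, hH, if_true, ne_eq, not_true_eq_false, if_false]
          rw [ihHdr d l, pvOutB_cons_hdr pats l ls hH,
              pvOutB_dropWhile pats _ (by intro x hx; simpa using hx) ls]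
          simp
        · intro d hdr
          rw [pvALoop_cons]
          simp only [← hpats, hH, if_true, reduceCtorEq, ne_eq,
            not_false_eq_true]
          rw [ihHdr (d ++ [hdr]) l, pvOutB_cons_hdr pats l ls hH,
              pvOutB_dropWhile pats _ (by intro x hx; simpa using hx) ls]
          simp [pvRender, hH]
        · intro d hdr k hk
          rw [pvALoop_cons]
          simp only [← hpats, hH, if_true, reduceCtorEq, ne_eq,
            not_false_eq_true]
          rw [ihHdr (d ++ hdr :: k) l, pvOutB_cons_hdr pats l ls hH,
              pvOutB_dropWhile pats _ (by intro x hx; simpa using hx) ls]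
          simp [hH]
      · -- l is not a header line
        by_cases hB : PySem.Str.strip l = ""
        · -- l is blank
          refine ⟨?_, ?_, ?_⟩
          · intro d
            rw [pvALoop_cons]
            simp only [← hpats, hH, Bool.false_eq_true, if_false]
            rw [ihOut d, pvOutB_cons_not pats l ls (by simpa using hH)]
          · intro d hdr
            rw [pvALoop_cons]
            simp only [← hpats, hH, hB, Bool.false_eq_true, if_false, reduceIte,
              ne_eq, not_true_eq_false, List.length_cons, List.length_nil,
              reduceCtorEq, not_false_eq_true, gt_iff_lt]
            rw [if_neg (by simp)]
            rw [ihHdr d hdr, pvOutB_cons_not pats l ls (by simpa using hH)]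
            simp [pvRender, hH, hB]
          · intro d hdr k hk
            rw [pvALoop_cons]
            simp only [← hpats, hH, hB, Bool.false_eq_true, if_false, reduceIte,
              ne_eq, not_true_eq_false, List.length_cons, reduceCtorEq,
              not_false_eq_true, gt_iff_lt]
            rw [if_pos (by
              constructor
              · simp
              · have := List.length_pos_iff.mpr hk
                simp
                omega)]
            rw [ihOut (d ++ hdr :: k), pvOutB_cons_not pats l ls (by simpa using hH)]
            simp [hB]
        · -- l is non-blank content
          refine ⟨?_, ?_, ?_⟩
          · intro d
            rw [pvALoop_cons]
            simp only [← hpats, hH, Bool.false_eq_true, if_false]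
            rw [ihOut d, pvOutB_cons_not pats l ls (by simpa using hH)]
          · intro d hdr
            rw [pvALoop_cons]
            simp only [← hpats, hH, hB, Bool.false_eq_true, if_false,
              ne_eq, not_false_eq_true, if_true]
            rw [show [hdr] ++ [l] = hdr :: [l] by rfl]
            rw [ihBody d hdr [l] (by simp), pvOutB_cons_not pats l ls (by simpa using hH)]
            rw [List.takeWhile_cons_of_pos (by simp [hH]),
                pvRender_cons_content hdr l _ hB, List.takeWhile_takeWhile]
            have hpred : (fun a => decide (((PySem.Str.strip a != "") = true) ∧ ((!pvIsHdr pats a) = true)))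
                = (fun x => (!pvIsHdr pats x && !(PySem.Str.strip x == ""))) := by
              funext x
              by_cases h2 : PySem.Str.strip x = "" <;> simp [h2, bne, Bool.and_comm]
            rw [hpred]
            simp
          · intro d hdr k hk
            rw [pvALoop_cons]
            simp only [← hpats, hH, hB, Bool.false_eq_true, if_false,
              ne_eq, not_false_eq_true, if_true]
            rw [show (hdr :: k) ++ [l] = hdr :: (k ++ [l]) by rfl]
            rw [ihBody d hdr (k ++ [l]) (by simp), pvOutB_cons_not pats l ls (by simpa using hH)]
            simp [hH, hB]
  -- end pvMain

-- ===== VERDICT (by name: the statement is the Claim_ definition above) =====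
theorem extract_deliverables_py_spec : Claim_equal_extract_deliverables_py := by
  intro text patterns _
  simp only [Spec_extract_deliverables_py, extract_deliverables_py, extract_deliverables_py_alt]
  have h := (pvMain (patterns.getD pvDefaultPatterns)
      ((PySem.Str.split? text "\n").getD []).length
      ((PySem.Str.split? text "\n").getD []) le_rfl).1 []
  simp only [List.nil_append] at h
  rw [h]
  rfl
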